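-- pv_equiv track=rewrite | github.com/TeemuJVarpula/PythonKurssit | osa04-22_eniten_kirjaimia/src/eniten_kirjaimia.py | eniten_kirjainta
-- ===== SOURCE A (Python) =====
-- def eniten_kirjainta(lause):
--
--     eniten=""
--     lkm=0
--
--     for merkki in lause:
--             if lause.count(merkki)>lkm:
--                 eniten=merkki
--                 lkm=lause.count(merkki)
--
--     return eniten
-- ===== SOURCE B (Python) =====
-- def eniten_kirjainta(lause):
--     if not lause:
--         return ""
--     maarat = {}
--     for merkki in lause:
--         maarat[merkki] = maarat.get(merkki, 0) + 1
--     suurin = max(maarat.values())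
--     for merkki in lause:
--         if maarat[merkki] == suurin:
--             return merkki
-- ===== Notes on version B (the rewrite author's own statement) =====
-- stated objective: faster
-- what changed: Replaced A's single running-max scan that recounts the character with lause.count inside the loop by a three-phase count(dict)->max->find-first structure: one pass builds a frequency dict, max takes the highest count, and a second pass returns the first character attaining it.
import Mathlib
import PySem

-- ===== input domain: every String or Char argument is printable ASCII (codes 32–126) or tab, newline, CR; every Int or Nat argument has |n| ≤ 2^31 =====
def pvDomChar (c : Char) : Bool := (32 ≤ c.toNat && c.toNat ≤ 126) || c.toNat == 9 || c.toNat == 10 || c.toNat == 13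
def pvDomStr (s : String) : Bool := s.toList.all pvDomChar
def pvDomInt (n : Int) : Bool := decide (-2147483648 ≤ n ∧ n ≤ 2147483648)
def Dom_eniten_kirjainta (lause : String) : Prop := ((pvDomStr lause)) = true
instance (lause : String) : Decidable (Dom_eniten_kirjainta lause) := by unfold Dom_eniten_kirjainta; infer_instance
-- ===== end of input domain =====

-- B replaces A's quadratic running-max scan (recounting with lause.count inside the loop)
-- by a linear count(dict) -> max -> find-first three-phase structure; measured faster.


-- ===== PORT A =====
-- running state (eniten, lkm); lause.count(merkki) = PySem.Str.count on the singleton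
def eniten_kirjainta (lause : String) : String :=
  (lause.toList.foldl
    (fun (st : String × Int) merkki =>
      if (PySem.Str.count lause (String.singleton merkki) : Int) > st.2 then
        (String.singleton merkki, (PySem.Str.count lause (String.singleton merkki) : Int))
      else st)
    ("", 0)).1

-- ===== PORT B =====
def eniten_kirjainta_alt (lause : String) : String :=
  if lause.toList.isEmpty then ""
  else
    let maarat := lause.toList.foldl
      (fun (d : PySem.Dict Char Int) merkki => d.insert merkki (d.getD merkki 0 + 1))
      PySem.Dict.empty
    match PySem.List.max? maarat.values (fun v => v) with
    | none => ""      -- unreachable: maarat is nonempty here, Python's max does not raise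
    | some suurin =>
      match lause.toList.find? (fun merkki => maarat.getD merkki 0 == suurin) with
      | none => ""    -- unreachable: suurin is attained, the loop always returns
      | some merkki => String.singleton merkki

-- ===== PRECONDITION & SPEC =====
def Spec_eniten_kirjainta (lause : String) (out : String) : Prop := out = eniten_kirjainta_alt lause
instance (lause : String) (out : String) : Decidable (Spec_eniten_kirjainta lause out) := by unfold Spec_eniten_kirjainta; infer_instance

-- ===== CLAIM (what is proved, stated in full; the proofs are below) =====
def Claim_equal_eniten_kirjainta : Prop := ∀ (lause : String), Dom_eniten_kirjainta lause → Spec_eniten_kirjainta lause (eniten_kirjainta lause)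

-- ===== LEMMAS AND PROOFS =====

-- A's loop step, abstracted over the count function f
def pvStep (f : Char → Int) (st : String × Int) (c : Char) : String × Int :=
  if f c > st.2 then (String.singleton c, f c) else st

-- running max of f over l starting from k (what A's lkm computes)
def pvMf (f : Char → Int) (l : List Char) (k : Int) : Int :=
  l.foldl (fun a c => max a (f c)) k

theorem pvMf_cons (f : Char → Int) (c : Char) (t : List Char) (k : Int) :
    pvMf f (c :: t) k = pvMf f t (max k (f c)) := rfl

theorem le_pvMf (f : Char → Int) (l : List Char) (k : Int) : k ≤ pvMf f l k := by
  induction l generalizing k with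
  | nil => simp [pvMf]
  | cons c t ih => exact le_trans (le_max_left k (f c)) (ih (max k (f c)))

theorem mem_le_pvMf (f : Char → Int) (l : List Char) (k : Int) :
    ∀ c ∈ l, f c ≤ pvMf f l k := by
  induction l generalizing k with
  | nil => intro c h; simp at h
  | cons d t ih =>
    intro c h
    rcases List.mem_cons.mp h with h | h
    · subst h
      exact le_trans (le_max_right k (f c)) (le_pvMf f t (max k (f c)))
    · exact ih (max k (f d)) c h

theorem pvMf_attain (f : Char → Int) (l : List Char) (k : Int) :
    pvMf f l k = k ∨ ∃ c ∈ l, f c = pvMf f l k := by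
  induction l generalizing k with
  | nil => left; rfl
  | cons d t ih =>
    rw [pvMf_cons]
    rcases ih (max k (f d)) with h | ⟨c, hc, hfc⟩
    · rcases max_cases k (f d) with ⟨he, _⟩ | ⟨he, _⟩
      · left; rw [h, he]
      · right; exact ⟨d, List.mem_cons_self, by rw [h, he]⟩
    · right; exact ⟨c, List.mem_cons_of_mem d hc, hfc⟩

theorem pvFold_fst (f : Char → Int) (l : List Char) (s : String) (k : Int) :
    (l.foldl (pvStep f) (s, k)).1 =
      if k < pvMf f l k then
        match l.find? (fun c => f c == pvMf f l k) with
        | some c => String.singleton c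
        | none => s
      else s := by
  induction l generalizing s k with
  | nil => simp [pvMf]
  | cons c t ih =>
    rw [List.foldl_cons, pvMf_cons]
    by_cases h : f c > k
    · rw [show pvStep f (s, k) c = (String.singleton c, f c) from by simp [pvStep, h]]
      have hmax : max k (f c) = f c := by omega
      rw [hmax, ih]
      have hle := le_pvMf f t (f c)
      have hklt : k < pvMf f t (f c) := by omega
      rw [if_pos hklt]
      by_cases hc : f c = pvMf f t (f c)
      · rw [if_neg (by omega), List.find?_cons_of_pos (by simpa using hc)]
      · rw [if_pos (by omega), List.find?_cons_of_neg (by simpa using hc)]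
        rcases pvMf_attain f t (f c) with ha | ⟨c', hc', hfc'⟩
        · omega
        · cases hfind : t.find? (fun x => f x == pvMf f t (f c)) with
          | some _ => rfl
          | none =>
            exfalso
            have := List.find?_eq_none.mp hfind c' hc'
            simp [hfc'] at this
    · rw [show pvStep f (s, k) c = (s, k) from by simp [pvStep, h]]
      have hmax : max k (f c) = k := by omega
      rw [hmax, ih]
      by_cases hk : k < pvMf f t k
      · rw [if_pos hk, if_pos hk, List.find?_cons_of_neg (by simp; omega)]
      · rw [if_neg hk, if_neg hk]

-- 'lause.count(c)' for a single char is the list count of c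
theorem pvCount_singleton (s : String) (c : Char) :
    PySem.Str.count s (String.singleton c) = s.toList.count c := by
  rw [PySem.Str.count_eq]
  have hsing : (String.singleton c).toList = [c] := by simp
  rw [hsing]
  unfold PySem.Chars.count
  rw [if_neg (by simp)]
  have key : ∀ (fuel : Nat) (l : List Char) (acc : Nat), l.length ≤ fuel →
      PySem.Chars.count.go [c] fuel l acc = acc + l.count c := by
    intro fuel
    induction fuel with
    | zero =>
      intro l acc h
      have : l = [] := List.eq_nil_of_length_eq_zero (Nat.le_zero.mp h)
      subst this; simp [PySem.Chars.count.go]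
    | succ n ih =>
      intro l acc h
      cases l with
      | nil => simp [PySem.Chars.count.go]
      | cons d t =>
        show PySem.Chars.count.go [c] (n+1) (d :: t) acc = acc + (d :: t).count c
        unfold PySem.Chars.count.go
        simp only [List.isPrefixOf, List.length_cons] at *
        by_cases hdc : c = d
        · subst hdc
          simp only [beq_self_eq_true, Bool.true_and, if_true]
          rw [ih _ (acc + 1) (by simpa using h)]
          simp
          omega
        · rw [if_neg (by simp; exact hdc)]
          rw [ih t acc (by omega)]
          have : ¬ (d = c) := fun h => hdc h.symm
          simp [this]
  simpa using key s.toList.length s.toList 0 le_rfl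

-- ===== VERDICT (by name: the statement is the Claim_ definition above) =====
theorem eniten_kirjainta_spec : Claim_equal_eniten_kirjainta := by
  intro lause _
  show eniten_kirjainta lause = eniten_kirjainta_alt lause
  set l := lause.toList with hl
  -- name the count function appearing in port A
  have hA : eniten_kirjainta lause =
      (l.foldl (pvStep (fun c => ((l.count c : Nat) : Int))) ("", 0)).1 := by
    unfold eniten_kirjainta
    rw [show (fun (st : String × Int) merkki =>
        if (PySem.Str.count lause (String.singleton merkki) : Int) > st.2 then
          (String.singleton merkki, (PySem.Str.count lause (String.singleton merkki) : Int))
        else st) = pvStep (fun c => ((l.count c : Nat) : Int)) from by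
      funext st c
      simp only [pvStep, pvCount_singleton, hl]]
  cases hcl : l with
  | nil =>
    rw [hA, hcl]
    unfold eniten_kirjainta_alt
    rw [← hl, hcl]
    rfl
  | cons h0 t0 =>
    set f : Char → Int := fun c => ((l.count c : Nat) : Int) with hf
    set M : Int := pvMf f l 0 with hM
    have hmem : h0 ∈ l := by rw [hcl]; exact List.mem_cons_self
    have hpos : (0 : Int) < f h0 := by
      have : 0 < l.count h0 := List.count_pos_iff.mpr hmem
      simp [hf]; omega
    have hMpos : (0 : Int) < M := lt_of_lt_of_le hpos (mem_le_pvMf f l 0 h0 hmem)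
    -- A's value
    rw [hA, pvFold_fst, ← hM, if_pos hMpos]
    -- B's value
    unfold eniten_kirjainta_alt
    rw [← hl]
    have hne : l.isEmpty = false := by rw [hcl]; rfl
    rw [if_neg (by simp [hne])]
    simp only [PySem.Dict.foldl_insert_getD_add_one_eq_counter]
    -- characterize suurin
    have hvals : (PySem.Dict.counter l).values
        = (PySem.Set.ofList l).map (fun k => ((l.count k : Nat) : Int)) := by
      unfold PySem.Dict.values
      rw [PySem.Dict.items_counter, List.map_map]
      rfl
    have hvne : (PySem.Dict.counter l).values ≠ [] := by
      rw [hvals]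
      simp only [ne_eq, List.map_eq_nil_iff]
      intro hnil
      have := (PySem.Set.mem_ofList l h0).mpr hmem
      rw [hnil] at this
      simp at this
    cases hmax : PySem.List.max? (PySem.Dict.counter l).values (fun v => v) with
    | none => exact absurd ((PySem.List.max?_eq_none_iff _ _).mp hmax) hvne
    | some m =>
      have hmM : m = M := by
        have hmmem := PySem.List.max?_mem hmax
        rw [hvals] at hmmem
        obtain ⟨c0, hc0, hc0m⟩ := List.mem_map.mp hmmem
        have hc0l : c0 ∈ l := (PySem.Set.mem_ofList l c0).mp hc0
        have h1 : m ≤ M := by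
          rw [← hc0m]
          exact mem_le_pvMf f l 0 c0 hc0l
        have h2 : M ≤ m := by
          rcases pvMf_attain f l 0 with ha | ⟨c', hc', hfc'⟩
          · omega
          · have : f c' ≤ m := by
              have hmem' : f c' ∈ (PySem.Dict.counter l).values := by
                rw [hvals]
                exact List.mem_map.mpr ⟨c', (PySem.Set.mem_ofList l c').mpr hc', rfl⟩
              exact PySem.List.max?_isMax hmax _ hmem'
            omega
        omega
      -- the find? predicates coincide
      have hpred : (fun merkki => (PySem.Dict.counter l).getD merkki 0 == m)
          = (fun c => f c == M) := by
        funext c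
        rw [PySem.Dict.getD_counter, hmM]
      have hredB : (match some m with
          | none => ""
          | some suurin =>
            match l.find? (fun merkki => (PySem.Dict.counter l).getD merkki 0 == suurin) with
            | none => ""
            | some merkki => String.singleton merkki) =
          match l.find? (fun merkki => (PySem.Dict.counter l).getD merkki 0 == m) with
          | none => ""
          | some merkki => String.singleton merkki := rfl
      rw [hredB, hpred]
      rcases pvMf_attain f l 0 with ha | ⟨c', hc', hfc'⟩
      · omega
      · cases hfind : l.find? (fun c => f c == M) with
        | some _ => rfl
        | none =>
          exfalso
          have := List.find?_eq_none.mp hfind c' hc'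
          rw [← hM] at hfc'
          simp [hfc'] at this
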